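-- pv_equiv track=rewrite | github.com/dfuller22/US_Senate_Election_Predictor | functions.py | is_state
-- ===== SOURCE A (Python) =====
-- def is_state(href):
--
--     ## Helper list with all U.S. states formatted
--     states_list = ['Alabama', 'Alaska', 'Arizona', 'Arkansas', 'California',
--                    'Colorado', 'Connecticut', 'Delaware', 'Florida', 'Georgia',
--                    'Hawaii', 'Idaho', 'Illinois', 'Indiana', 'Iowa', 'Kansas',
--                    'Kentucky', 'Louisiana', 'Maine', 'Maryland',
--                    'Massachusetts', 'Michigan', 'Minnesota', 'Mississippi',
--                    'Missouri', 'Montana', 'Nebraska', 'Nevada', 'New_Hampshire',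
--                    'New_Jersey', 'New_Mexico', 'New_York', 'North_Carolina',
--                    'North_Dakota', 'Ohio', 'Oklahoma', 'Oregon', 'Pennsylvania',
--                    'Rhode_Island', 'South_Carolina', 'South_Dakota',
--                    'Tennessee', 'Texas', 'Utah', 'Vermont', 'Virginia',
--                    'Washington', 'West_Virginia', 'Wisconsin', 'Wyoming']
--
--     ## Confirming known states in link before returning it
--     for state in states_list:
--         if state in href:
--             return href
-- ===== SOURCE B (Python) =====
-- def is_state(href):
--
--     ## Same U.S. state names as the original, stored as one string
--     states_list = ('Alabama Alaska Arizona Arkansas California Colorado '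
--                    'Connecticut Delaware Florida Georgia Hawaii Idaho '
--                    'Illinois Indiana Iowa Kansas Kentucky Louisiana Maine '
--                    'Maryland Massachusetts Michigan Minnesota Mississippi '
--                    'Missouri Montana Nebraska Nevada New_Hampshire '
--                    'New_Jersey New_Mexico New_York North_Carolina '
--                    'North_Dakota Ohio Oklahoma Oregon Pennsylvania '
--                    'Rhode_Island South_Carolina South_Dakota Tennessee '
--                    'Texas Utah Vermont Virginia Washington West_Virginia '
--                    'Wisconsin Wyoming').split()
--
--     ## Index the names once by their first letter, then scan href in a single
--     ## pass: at each position only the names starting with that character are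
--     ## candidates, so the 50 separate whole-string substring searches disappear.
--     by_first = {}
--     for s in states_list:
--         by_first.setdefault(s[0], []).append(s)
--
--     for i in range(len(href)):
--         for s in by_first.get(href[i], ()):
--             if href.startswith(s, i):
--                 return href
--     return None
-- ===== Notes on version B (the rewrite author's own statement) =====
-- stated objective: alternative
-- what changed: B indexes the state names once by first letter and scans href in a single left-to-right pass, testing at each position only the names starting with that character, instead of running 50 independent whole-string substring searches.
import Mathlib
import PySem

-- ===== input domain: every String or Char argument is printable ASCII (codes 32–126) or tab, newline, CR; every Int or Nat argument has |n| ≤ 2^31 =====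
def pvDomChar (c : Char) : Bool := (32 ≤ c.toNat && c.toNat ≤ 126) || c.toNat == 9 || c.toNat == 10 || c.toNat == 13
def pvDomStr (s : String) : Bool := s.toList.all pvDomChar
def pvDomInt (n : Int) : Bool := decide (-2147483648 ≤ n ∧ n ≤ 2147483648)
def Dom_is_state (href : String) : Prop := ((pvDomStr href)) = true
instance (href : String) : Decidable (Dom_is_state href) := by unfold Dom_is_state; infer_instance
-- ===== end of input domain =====

-- B replaces A's 50 independent substring tests by a single left-to-right scan of
-- href with a first-letter index over the state names (objective: alternative).

-- ===== PORT A =====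
def pyStatesA : List String :=
  ["Alabama", "Alaska", "Arizona", "Arkansas", "California",
   "Colorado", "Connecticut", "Delaware", "Florida", "Georgia",
   "Hawaii", "Idaho", "Illinois", "Indiana", "Iowa", "Kansas",
   "Kentucky", "Louisiana", "Maine", "Maryland",
   "Massachusetts", "Michigan", "Minnesota", "Mississippi",
   "Missouri", "Montana", "Nebraska", "Nevada", "New_Hampshire",
   "New_Jersey", "New_Mexico", "New_York", "North_Carolina",
   "North_Dakota", "Ohio", "Oklahoma", "Oregon", "Pennsylvania",
   "Rhode_Island", "South_Carolina", "South_Dakota",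
   "Tennessee", "Texas", "Utah", "Vermont", "Virginia",
   "Washington", "West_Virginia", "Wisconsin", "Wyoming"]

-- 'for state in states_list: if state in href: return href' (fall-through = None)
def aLoop (states : List String) (href : String) : Option String :=
  match states with
  | [] => none
  | s :: rest => if PySem.Str.isIn s href then some href else aLoop rest href

def is_state (href : String) : Option String := aLoop pyStatesA href

-- ===== PORT B =====
def pyStatesB : List String :=
  PySem.Str.split₀
    ("Alabama Alaska Arizona Arkansas California Colorado " ++
     "Connecticut Delaware Florida Georgia Hawaii Idaho " ++
     "Illinois Indiana Iowa Kansas Kentucky Louisiana Maine " ++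
     "Maryland Massachusetts Michigan Minnesota Mississippi " ++
     "Missouri Montana Nebraska Nevada New_Hampshire " ++
     "New_Jersey New_Mexico New_York North_Carolina " ++
     "North_Dakota Ohio Oklahoma Oregon Pennsylvania " ++
     "Rhode_Island South_Carolina South_Dakota Tennessee " ++
     "Texas Utah Vermont Virginia Washington West_Virginia " ++
     "Wisconsin Wyoming")

-- by_first.setdefault(s[0], []).append(s); every state literal is nonempty, so
-- s[0] is ported as headD (the default is never used on pyStatesB)
def bIndex (states : List String) : PySem.Dict Char (List String) :=
  states.foldl
    (fun d s =>
      d.insert (s.toList.headD ' ') (d.getD (s.toList.headD ' ') [] ++ [s]))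
    PySem.Dict.empty

-- 'for i in range(len(href)): for s in by_first.get(href[i], ()): if href.startswith(s, i): return href'
-- ported as the obvious structural recursion over the suffix href[i:] (head = href[i],
-- startswith(s, i) = prefix test on the suffix)
def bScan (d : PySem.Dict Char (List String)) (tail : List Char) : Bool :=
  match tail with
  | [] => false
  | c :: rest =>
      if (d.getD c []).any (fun s => s.toList.isPrefixOf (c :: rest)) then true
      else bScan d rest

def is_state_alt (href : String) : Option String :=
  if bScan (bIndex pyStatesB) href.toList then some href else none

-- ===== PRECONDITION & SPEC =====
def Spec_is_state (href : String) (out : Option String) : Prop := out = is_state_alt href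
instance (href : String) (out : Option String) : Decidable (Spec_is_state href out) := by unfold Spec_is_state; infer_instance

-- ===== CLAIM (what is proved, stated in full; the proofs are below) =====
def Claim_equal_is_state : Prop := ∀ (href : String), Dom_is_state href → Spec_is_state href (is_state href)

-- ===== LEMMAS AND PROOFS =====
theorem aLoop_eq (states : List String) (href : String) :
    aLoop states href =
      if ∃ s ∈ states, s.toList <:+: href.toList then some href else none := by
  induction states with
  | nil => simp [aLoop]
  | cons s rest ih =>
      simp only [aLoop]
      by_cases h : PySem.Str.isIn s href = true
      · rw [if_pos h,
          if_pos ⟨s, List.mem_cons_self .., (PySem.Str.isIn_iff_infix s href).mp h⟩]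
      · rw [if_neg h, ih]
        have h' : ¬ s.toList <:+: href.toList :=
          fun hh => h ((PySem.Str.isIn_iff_infix s href).mpr hh)
        by_cases he : ∃ t ∈ rest, t.toList <:+: href.toList
        · rcases he with ⟨t, ht, hti⟩
          rw [if_pos ⟨t, ht, hti⟩, if_pos ⟨t, List.mem_cons_of_mem s ht, hti⟩]
        · rw [if_neg he, if_neg ?_]
          rintro ⟨t, ht, hti⟩
          rcases List.mem_cons.mp ht with rfl | ht'
          · exact h' hti
          · exact he ⟨t, ht', hti⟩

theorem bIndex_getD (states : List String) (d : PySem.Dict Char (List String)) (c : Char) :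
    (states.foldl
        (fun d s =>
          d.insert (s.toList.headD ' ') (d.getD (s.toList.headD ' ') [] ++ [s])) d).getD c []
      = d.getD c [] ++ states.filter (fun s => s.toList.headD ' ' = c) := by
  induction states generalizing d with
  | nil => simp
  | cons s rest ih =>
      simp only [List.foldl_cons, List.filter_cons]
      rw [ih, PySem.Dict.getD_insert]
      generalize s.toList.headD ' ' = k
      by_cases h : c = k
      · subst h; simp
      · have h' : ¬ (k = c) := fun e => h e.symm
        simp [h, h']

theorem mem_bIndex (s : String) (c : Char) :
    s ∈ (bIndex pyStatesB).getD c [] ↔ s ∈ pyStatesB ∧ s.toList.headD ' ' = c := by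
  unfold bIndex
  rw [bIndex_getD]
  simp [List.mem_filter]

set_option maxRecDepth 4096 in
theorem statesB_ne_nil : ∀ s ∈ pyStatesB, s.toList ≠ [] := by decide

theorem bScan_iff (tail : List Char) :
    bScan (bIndex pyStatesB) tail = true ↔ ∃ s ∈ pyStatesB, s.toList <:+: tail := by
  induction tail with
  | nil =>
      simp only [bScan, Bool.false_eq_true, false_iff]
      rintro ⟨s, hs, hinf⟩
      exact statesB_ne_nil s hs (List.eq_nil_of_infix_nil hinf)
  | cons c rest ih =>
      simp only [bScan]
      by_cases h : ((bIndex pyStatesB).getD c []).any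
          (fun s => s.toList.isPrefixOf (c :: rest)) = true
      · rw [if_pos h]
        refine iff_of_true rfl ?_
        rcases List.any_eq_true.mp h with ⟨s, hs, hp⟩
        exact ⟨s, ((mem_bIndex s c).mp hs).1,
          (List.isPrefixOf_iff_prefix.mp hp).isInfix⟩
      · rw [if_neg h, ih]
        constructor
        · rintro ⟨s, hs, hinf⟩
          exact ⟨s, hs, hinf.trans (List.suffix_cons c rest).isInfix⟩
        · rintro ⟨s, hs, hinf⟩
          rcases List.infix_cons_iff.mp hinf with hpre | hrest
          · exfalso
            apply h
            refine List.any_eq_true.mpr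
              ⟨s, (mem_bIndex s c).mpr ⟨hs, ?_⟩, List.isPrefixOf_iff_prefix.mpr hpre⟩
            rcases hpre with ⟨t, ht⟩
            cases hl : s.toList with
            | nil => exact absurd hl (statesB_ne_nil s hs)
            | cons x xs =>
                rw [hl] at ht
                simp only [List.cons_append, List.cons.injEq] at ht
                simp [ht.1]
          · exact ⟨s, hs, hrest⟩

set_option maxRecDepth 4096 in
theorem statesA_eq_statesB : pyStatesA = pyStatesB := by decide

-- ===== VERDICT (by name: the statement is the Claim_ definition above) =====
theorem is_state_spec : Claim_equal_is_state := by
  intro href _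
  unfold Spec_is_state is_state is_state_alt
  rw [aLoop_eq, statesA_eq_statesB]
  by_cases h : ∃ s ∈ pyStatesB, s.toList <:+: href.toList
  · rw [if_pos h, if_pos ((bScan_iff href.toList).mpr h)]
  · rw [if_neg h, if_neg (fun hb => h ((bScan_iff href.toList).mp hb))]
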